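-- pv_equiv track=rewrite | github.com/weirdev/advent-of-code-2023 | day13/main.py | identity_dict_rows
-- ===== SOURCE A (Python) =====
-- from typing import List, Dict, Optional
--
-- def identity_dict_rows(grid: List[str]) -> Dict[int, List[int]]:
--     content_to_row_nums = {}
--     for y, row in enumerate(grid):
--         if row not in content_to_row_nums:
--             content_to_row_nums[row] = [y]
--         else:
--             content_to_row_nums[row].append(y)
--
--     idd = {}
--     for row_nums in content_to_row_nums.values():
--         for row_num in row_nums:
--             idd[row_num] = row_nums
--     return idd
-- ===== SOURCE B (Python) =====
-- from typing import List, Dict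
--
-- def identity_dict_rows(grid: List[str]) -> Dict[int, List[int]]:
--     idd = {}
--     for y, row in enumerate(grid):
--         if row not in grid[:y]:  # first occurrence of this content
--             members = [j for j, r in enumerate(grid) if r == row]
--             for j in members:
--                 idd[j] = members
--     return idd
-- ===== Notes on version B (the rewrite author's own statement) =====
-- stated objective: alternative
-- what changed: Drops the content-to-indices grouping dict entirely: for each first occurrence of a row content, B rescans the whole grid with an equality comprehension to collect that content's indices and writes the result entries directly, instead of A's two-phase index-building then redistribution.
import Mathlib
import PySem

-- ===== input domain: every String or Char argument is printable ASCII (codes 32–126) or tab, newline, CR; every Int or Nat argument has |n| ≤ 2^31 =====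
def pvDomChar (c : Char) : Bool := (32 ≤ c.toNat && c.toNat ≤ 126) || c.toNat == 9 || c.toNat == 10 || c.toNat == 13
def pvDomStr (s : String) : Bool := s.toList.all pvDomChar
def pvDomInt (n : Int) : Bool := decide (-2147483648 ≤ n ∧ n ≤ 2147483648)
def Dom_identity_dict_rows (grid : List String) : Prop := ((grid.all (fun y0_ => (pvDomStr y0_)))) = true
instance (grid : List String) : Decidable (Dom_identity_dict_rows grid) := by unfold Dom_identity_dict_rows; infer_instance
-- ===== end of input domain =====

-- B drops A's content-to-indices grouping dict: at each first occurrence of a row content it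
-- rescans the grid for equal rows and writes those entries directly (alternative decomposition,
-- same return value; no speed claim).

-- ===== PORT A =====
def identity_dict_rows (grid : List String) : List (Int × List Int) :=
  let cd := (PySem.List.enumerate grid).foldl (fun d p =>
    if !(d.contains p.2) then d.insert p.2 [p.1]
    else d.modify p.2 [] (fun v => v ++ [p.1])) PySem.Dict.empty
  (cd.values.foldl (fun idd row_nums =>
    row_nums.foldl (fun idd rn => idd.insert rn row_nums) idd) PySem.Dict.empty).items

-- ===== PORT B =====
-- [j for j, r in enumerate(grid) if r == row]
def pvMembers (grid : List String) (row : String) : List Int :=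
  ((PySem.List.enumerate grid).filter (fun p => p.2 == row)).map (fun p => p.1)

def identity_dict_rows_alt (grid : List String) : List (Int × List Int) :=
  ((PySem.List.enumerate grid).foldl (fun idd p =>
    if !((PySem.List.slice grid none (some p.1)).contains p.2) then
      (pvMembers grid p.2).foldl (fun idd j => idd.insert j (pvMembers grid p.2)) idd
    else idd) PySem.Dict.empty).items

-- ===== PRECONDITION & SPEC =====
def Spec_identity_dict_rows (grid : List String) (out : List (Int × List Int)) : Prop := out = identity_dict_rows_alt grid
instance (grid : List String) (out : List (Int × List Int)) : Decidable (Spec_identity_dict_rows grid out) := by unfold Spec_identity_dict_rows; infer_instance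

-- ===== CLAIM (what is proved, stated in full; the proofs are below) =====
def Claim_equal_identity_dict_rows : Prop := ∀ (grid : List String), Dom_identity_dict_rows grid → Spec_identity_dict_rows grid (identity_dict_rows grid)

-- ===== LEMMAS AND PROOFS =====

-- the common normal form both ports are reduced to
def pvPairs (grid : List String) : List (Int × List Int) :=
  (PySem.Set.ofList grid).flatMap (fun r => (pvMembers grid r).map (fun j => (j, pvMembers grid r)))

theorem pv_foldl_flat {α β γ : Type} (l : List α) (g : α → List β) (f : γ → β → γ) (init : γ) :
    l.foldl (fun d x => (g x).foldl f d) init = (l.flatMap g).foldl f init := by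
  induction l generalizing init with
  | nil => rfl
  | cons a t ih => simp [List.flatMap_cons, List.foldl_append, ih]

theorem pv_flatMap_if {α β : Type} (l : List α) (c : α → Bool) (F : α → List β) :
    (l.flatMap (fun x => if c x then F x else [])) = (l.filter c).flatMap F := by
  induction l with
  | nil => rfl
  | cons a t ih => by_cases h : c a <;> simp [h, ih]

-- A's grouping loop is the uniform "modify with default []" loop
theorem pv_cd_eq (grid : List String) :
    ((PySem.List.enumerate grid).foldl (fun d p =>
      if !(d.contains p.2) then d.insert p.2 [p.1]
      else d.modify p.2 [] (fun v => v ++ [p.1])) PySem.Dict.empty)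
    = (PySem.List.enumerate grid).foldl (fun d p =>
        d.modify p.2 [] (fun v => v ++ [p.1])) PySem.Dict.empty := by
  have hfun : ∀ (d : PySem.Dict String (List Int)) (p : Int × String),
      (if !(d.contains p.2) then d.insert p.2 [p.1]
       else d.modify p.2 [] (fun v => v ++ [p.1]))
      = d.modify p.2 [] (fun v => v ++ [p.1]) := by
    intro d p
    cases h : d.contains p.2 with
    | false =>
        simp [PySem.Dict.modify, PySem.Dict.getD_of_not_contains d _ h]
    | true => rfl
  simp only [hfun]

-- content dict lookup = pvMembers
theorem pv_cd_getD (grid : List String) (r : String) :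
    ((PySem.List.enumerate grid).foldl (fun d p =>
        d.modify p.2 [] (fun v => v ++ [p.1])) PySem.Dict.empty).getD r []
    = pvMembers grid r := by
  have h : (PySem.List.enumerate grid).foldl (fun d p =>
        d.modify p.2 [] (fun v => v ++ [p.1])) PySem.Dict.empty
      = ((PySem.List.enumerate grid).map Prod.swap).foldl
          (fun d p => d.modify p.1 [] (fun v => v ++ [p.2])) PySem.Dict.empty := by
    rw [List.foldl_map]
    rfl
  rw [h, PySem.Dict.getD_foldl_modify_append]
  simp [pvMembers, List.filter_map, List.map_map, Function.comp_def, Prod.swap]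

-- content dict values = members lists of the distinct rows, in first-occurrence order
theorem pv_cd_values (grid : List String) :
    ((PySem.List.enumerate grid).foldl (fun d p =>
        d.modify p.2 [] (fun v => v ++ [p.1])) PySem.Dict.empty).values
    = (PySem.Set.ofList grid).map (fun r => pvMembers grid r) := by
  have hkeys : ((PySem.List.enumerate grid).foldl (fun d p =>
        d.modify p.2 [] (fun v => v ++ [p.1])) PySem.Dict.empty).keys
      = PySem.Set.ofList grid := by
    have h := PySem.Dict.keys_foldl_modify_key (PySem.List.enumerate grid)
      (fun p => p.2) [] (fun _ p => fun v => v ++ [p.1]) PySem.Dict.empty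
    rw [h, PySem.Dict.keys_empty, PySem.List.map_snd_enumerate,
      PySem.Set.ofList_eq_foldl]
    rfl
  have hnd : ((PySem.List.enumerate grid).foldl (fun d p =>
        d.modify p.2 [] (fun v => v ++ [p.1])) PySem.Dict.empty).keys.Nodup := by
    exact PySem.Dict.nodup_keys_foldl_modify_key (PySem.List.enumerate grid)
      (fun p => p.2) [] (fun _ p => fun v => v ++ [p.1]) PySem.Dict.empty
      PySem.Dict.nodup_keys_empty
  rw [PySem.Dict.values_eq_map_keys _ hnd [], hkeys]
  exact List.map_congr_left (fun k _ => pv_cd_getD grid k)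

-- port A reduces to the normal form
theorem pv_A_eq (grid : List String) :
    identity_dict_rows grid
    = ((pvPairs grid).foldl (fun d p => d.insert p.1 p.2) PySem.Dict.empty).items := by
  show (((PySem.List.enumerate grid).foldl (fun d p =>
        if !(d.contains p.2) then d.insert p.2 [p.1]
        else d.modify p.2 [] (fun v => v ++ [p.1])) PySem.Dict.empty).values.foldl
      (fun idd row_nums => row_nums.foldl (fun idd rn => idd.insert rn row_nums) idd)
      PySem.Dict.empty).items = _
  rw [pv_cd_eq, pv_cd_values]
  have hinner : ∀ (d : PySem.Dict Int (List Int)) (ms : List Int),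
      ms.foldl (fun idd rn => idd.insert rn ms) d
      = (ms.map (fun rn => (rn, ms))).foldl (fun d p => d.insert p.1 p.2) d := by
    intro d ms; rw [List.foldl_map]
  simp only [hinner]
  rw [pv_foldl_flat, List.flatMap_map]
  rfl

-- the rows passing B's first-occurrence test are exactly the distinct rows, in order
theorem pv_firsts (grid : List String) :
    (((PySem.List.enumerate grid).filter
        (fun p => !((PySem.List.slice grid none (some p.1)).contains p.2))).map
      (fun p => p.2))
    = PySem.Set.ofList grid := by
  induction grid using List.reverseRecOn with
  | nil => rfl
  | append_singleton gs r ih =>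
      rw [PySem.List.enumerate_append, List.filter_append, List.map_append]
      have hpref : (PySem.List.enumerate gs 0).filter
            (fun p => !((PySem.List.slice (gs ++ [r]) none (some p.1)).contains p.2))
          = (PySem.List.enumerate gs 0).filter
            (fun p => !((PySem.List.slice gs none (some p.1)).contains p.2)) := by
        apply List.filter_congr
        intro p hp
        rcases (PySem.List.mem_enumerate_iff gs 0 p).1 hp with ⟨k, hk, rfl⟩
        simp only [PySem.List.slice_to _ (by omega : (0:Int) ≤ 0 + (k:Int))]
        rw [show ((0:Int) + (k:Int)).toNat = k by omega,
          List.take_append_of_le_length (le_of_lt hk)]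
      rw [hpref, ih]
      have hlast : PySem.List.slice (gs ++ [r]) none (some ((gs.length : Int)))
          = gs := by
        rw [PySem.List.slice_to _ (by positivity),
          show ((gs.length:Int)).toNat = gs.length by omega,
          List.take_append_of_le_length (le_refl _), List.take_length]
      rw [show PySem.Set.ofList (gs ++ [r])
            = PySem.Set.add (PySem.Set.ofList gs) r by
          rw [PySem.Set.ofList_eq_foldl, PySem.Set.ofList_eq_foldl, List.foldl_append]
          rfl]
      cases hc : gs.contains r with
      | true =>
          have hmem : r ∈ gs := by simpa [List.contains_iff_mem] using hc
          have hset : PySem.Set.add (PySem.Set.ofList gs) r = PySem.Set.ofList gs := by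
            simp [PySem.Set.add, PySem.Set.contains,
              (PySem.Set.mem_ofList gs r).2 hmem]
          rw [hset]
          simp [PySem.List.enumerate_cons, PySem.List.enumerate_nil, hlast, hmem]
      | false =>
          have hmem : r ∉ gs := by simpa [List.contains_iff_mem] using hc
          have hset : PySem.Set.add (PySem.Set.ofList gs) r
              = PySem.Set.ofList gs ++ [r] := by
            have : r ∉ PySem.Set.ofList gs := fun h => hmem ((PySem.Set.mem_ofList gs r).1 h)
            simp [PySem.Set.add, PySem.Set.contains, this]
          rw [hset]
          simp [PySem.List.enumerate_cons, PySem.List.enumerate_nil, hlast, hmem]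

-- port B reduces to the same normal form
theorem pv_B_eq (grid : List String) :
    identity_dict_rows_alt grid
    = ((pvPairs grid).foldl (fun d p => d.insert p.1 p.2) PySem.Dict.empty).items := by
  show ((PySem.List.enumerate grid).foldl (fun idd p =>
      if !((PySem.List.slice grid none (some p.1)).contains p.2) then
        (pvMembers grid p.2).foldl (fun idd j => idd.insert j (pvMembers grid p.2)) idd
      else idd) PySem.Dict.empty).items = _
  have hbody : ∀ (d : PySem.Dict Int (List Int)) (p : Int × String),
      (if !((PySem.List.slice grid none (some p.1)).contains p.2) then
        (pvMembers grid p.2).foldl (fun idd j => idd.insert j (pvMembers grid p.2)) d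
      else d)
      = ((if !((PySem.List.slice grid none (some p.1)).contains p.2) then
            (pvMembers grid p.2).map (fun j => (j, pvMembers grid p.2))
          else []).foldl (fun d q => d.insert q.1 q.2) d) := by
    intro d p
    cases h : (PySem.List.slice grid none (some p.1)).contains p.2 with
    | false => simp [List.foldl_map]
    | true => simp
  simp only [hbody]
  rw [pv_foldl_flat, pv_flatMap_if]
  congr 1
  unfold pvPairs
  rw [← pv_firsts grid, List.flatMap_map]

-- ===== VERDICT (by name: the statement is the Claim_ definition above) =====
theorem identity_dict_rows_spec : Claim_equal_identity_dict_rows := by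
  intro grid _
  unfold Spec_identity_dict_rows
  rw [pv_A_eq, pv_B_eq]
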